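-- pv_equiv track=rewrite | github.com/Retkoj/AOC_2022 | src/day_24_1.py | get_all_locations
-- ===== SOURCE A (Python) =====
-- def get_wall_locations(grid) -> set:
--     wall_locations = []
--     for i, row in enumerate(grid):
--         for j, value in enumerate(row):
--             if value == '#':
--                 wall_locations.append((i, j))
--     return set(wall_locations)
--
-- def get_all_locations(grid) -> set:
--     """All storm locations and empty, thus not including walls"""
--     all_locations = []
--     for i, row in enumerate(grid):
--         for j, value in enumerate(row):
--             all_locations.append((i, j))
--     walls = get_wall_locations(grid)
--     valid_locations = set(all_locations).difference(walls)
--     return valid_locations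
-- ===== SOURCE B (Python) =====
-- def get_all_locations(grid) -> set:
--     """All storm locations and empty, thus not including walls"""
--     return {(i, j)
--             for i, row in enumerate(grid)
--             for j, value in enumerate(row)
--             if value != '#'}
-- ===== Notes on version B (the rewrite author's own statement) =====
-- stated objective: simpler
-- what changed: Replaces the two full grid scans (all-locations list plus a separate wall-set helper) and the final set difference with a single nested set comprehension that adds (i, j) directly when the cell is not '#'.
import Mathlib
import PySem

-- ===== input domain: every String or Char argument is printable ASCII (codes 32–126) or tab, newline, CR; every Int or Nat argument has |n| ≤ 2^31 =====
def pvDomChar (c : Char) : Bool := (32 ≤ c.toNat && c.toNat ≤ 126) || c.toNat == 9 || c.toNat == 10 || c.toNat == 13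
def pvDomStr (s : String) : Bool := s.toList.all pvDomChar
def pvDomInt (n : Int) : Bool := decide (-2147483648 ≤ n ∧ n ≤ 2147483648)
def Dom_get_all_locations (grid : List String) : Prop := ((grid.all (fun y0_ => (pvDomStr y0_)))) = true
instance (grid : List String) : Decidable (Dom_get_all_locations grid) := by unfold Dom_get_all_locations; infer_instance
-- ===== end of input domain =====

-- B replaces A's two full scans (all-locations list + wall-set helper) and set difference
-- with one nested set comprehension keeping (i, j) when the cell is not '#' (objective: simpler).

-- ===== PORT A =====
def get_wall_locations (grid : List String) : List (Int × Int) :=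
  let wall_locations := (PySem.List.enumerate grid).foldl (fun acc p =>
    (PySem.List.enumerate p.2.toList).foldl (fun acc q =>
      if q.2 == '#' then acc ++ [(p.1, q.1)] else acc) acc) []
  PySem.Set.ofList wall_locations

def get_all_locations (grid : List String) : List (Int × Int) :=
  let all_locations := (PySem.List.enumerate grid).foldl (fun acc p =>
    (PySem.List.enumerate p.2.toList).foldl (fun acc q => acc ++ [(p.1, q.1)]) acc) []
  let walls := get_wall_locations grid
  PySem.Set.diff (PySem.Set.ofList all_locations) walls

-- ===== PORT B =====
def get_all_locations_alt (grid : List String) : List (Int × Int) :=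
  (PySem.List.enumerate grid).foldl (fun s p =>
    (PySem.List.enumerate p.2.toList).foldl (fun s q =>
      if q.2 != '#' then PySem.Set.add s (p.1, q.1) else s) s) []

-- ===== PRECONDITION & SPEC =====
def Spec_get_all_locations (grid : List String) (out : List (Int × Int)) : Prop := out = get_all_locations_alt grid
instance (grid : List String) (out : List (Int × Int)) : Decidable (Spec_get_all_locations grid out) := by unfold Spec_get_all_locations; infer_instance

-- ===== CLAIM (what is proved, stated in full; the proofs are below) =====
def Claim_equal_get_all_locations : Prop := ∀ (grid : List String), Dom_get_all_locations grid → Spec_get_all_locations grid (get_all_locations grid)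

-- ===== LEMMAS AND PROOFS =====

/-- The flat list of coordinates of cells whose value satisfies `pr`, row-major. -/
def pvSel (pr : Char → Bool) (grid : List String) : List (Int × Int) :=
  (PySem.List.enumerate grid).flatMap (fun p =>
    ((PySem.List.enumerate p.2.toList).filter (fun q => pr q.2)).map (fun q => (p.1, q.1)))

lemma enum_inj {α : Type} {xs : List α} {s : Int} {q q' : Int × α}
    (h : q ∈ PySem.List.enumerate xs s) (h' : q' ∈ PySem.List.enumerate xs s)
    (he : q.1 = q'.1) : q = q' := by
  rw [PySem.List.mem_enumerate_iff] at h h'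
  obtain ⟨k, hk, rfl⟩ := h
  obtain ⟨k', hk', rfl⟩ := h'
  simp only at he
  have : k = k' := by omega
  subst this; rfl

lemma pvSel_nodup (pr : Char → Bool) (grid : List String) : (pvSel pr grid).Nodup := by
  rw [pvSel, List.nodup_flatMap]
  constructor
  · intro p hp
    apply List.Nodup.map_on
    · intro q hq q' hq' h
      exact enum_inj (List.mem_of_mem_filter hq) (List.mem_of_mem_filter hq')
        (by simpa using congrArg Prod.snd h)
    · exact List.Nodup.filter _
        ((PySem.List.pairwise_lt_enumerate _ _).imp (fun h he => by subst he; exact lt_irrefl _ h))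
  · exact (PySem.List.pairwise_lt_enumerate _ _).imp (by
      intro p p' hlt x hx hx'
      simp only [List.mem_map] at hx hx'
      obtain ⟨q, _, rfl⟩ := hx
      obtain ⟨q', _, h⟩ := hx'
      have := congrArg Prod.fst h
      simp only at this
      omega)

lemma mem_pvSel_iff {grid : List String} {p : Int × String}
    (hp : p ∈ PySem.List.enumerate grid 0) {q : Int × Char}
    (hq : q ∈ PySem.List.enumerate p.2.toList 0) (pr : Char → Bool) :
    (p.1, q.1) ∈ pvSel pr grid ↔ pr q.2 = true := by
  constructor
  · intro h
    simp only [pvSel, List.mem_flatMap, List.mem_map, List.mem_filter] at h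
    obtain ⟨p', hp', q', ⟨hq', hpr⟩, heq⟩ := h
    have hpp : p' = p := enum_inj hp' hp (by simpa using congrArg Prod.fst heq)
    subst hpp
    have hqq : q' = q := enum_inj hq' hq (by simpa using congrArg Prod.snd heq)
    subst hqq; exact hpr
  · intro h
    simp only [pvSel, List.mem_flatMap, List.mem_map, List.mem_filter]
    exact ⟨p, hp, q, ⟨hq, h⟩, rfl⟩

lemma foldl_add_of_nodup (l : List (Int × Int)) (s : PySem.Set (Int × Int))
    (h : (s ++ l).Nodup) : l.foldl PySem.Set.add s = s ++ l := by
  induction l generalizing s with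
  | nil => simp
  | cons x l ih =>
    have hx : x ∉ s := fun hmem =>
      (List.nodup_append.mp h).2.2 x hmem x List.mem_cons_self rfl
    have hadd : PySem.Set.add s x = s ++ [x] := by simp [PySem.Set.add, hx]
    rw [List.foldl_cons, hadd, ih (s ++ [x]) (by simpa using h)]
    simp

lemma ofList_eq_self (l : List (Int × Int)) (h : l.Nodup) : PySem.Set.ofList l = l := by
  rw [PySem.Set.ofList]
  simpa using foldl_add_of_nodup l [] (by simpa using h)

lemma a_eq_sel (grid : List String) :
    get_all_locations grid = pvSel (fun c => c != '#') grid := by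
  have hW : get_wall_locations grid = pvSel (fun c => c == '#') grid := by
    rw [get_wall_locations]
    simp only [PySem.List.foldl_append_if, PySem.List.foldl_append_eq_flatMap, List.nil_append]
    exact ofList_eq_self _ (pvSel_nodup (fun c => c == '#') grid)
  rw [get_all_locations, hW]
  simp only [PySem.List.foldl_append_singleton_eq_map, PySem.List.foldl_append_eq_flatMap,
    List.nil_append]
  have hALL : PySem.Set.ofList ((PySem.List.enumerate grid).flatMap (fun p =>
      (PySem.List.enumerate p.2.toList).map (fun q => (p.1, q.1)))) = pvSel (fun _ => true) grid := by
    have h1 : (PySem.List.enumerate grid).flatMap (fun p =>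
        (PySem.List.enumerate p.2.toList).map (fun q => (p.1, q.1))) = pvSel (fun _ => true) grid := by
      simp [pvSel]
    rw [h1]
    exact ofList_eq_self _ (pvSel_nodup (fun _ => true) grid)
  rw [hALL, PySem.Set.diff, pvSel, pvSel, List.filter_flatMap]
  apply List.flatMap_congr
  intro p hp
  rw [List.filter_map]
  congr 1
  rw [List.filter_true]
  apply List.filter_congr
  intro q hq
  have hc : (pvSel (fun c => c == '#') grid).contains (p.1, q.1) = (q.2 == '#') := by
    rw [Bool.eq_iff_iff, List.contains_iff_mem]
    exact mem_pvSel_iff hp hq (fun c => c == '#')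
  show (!(pvSel (fun c => c == '#') grid).contains (p.1, q.1)) = (q.2 != '#')
  rw [hc]
  rfl

lemma b_eq_sel (grid : List String) :
    get_all_locations_alt grid = pvSel (fun c => c != '#') grid := by
  rw [get_all_locations_alt]
  have inner : ∀ (p : Int × String) (s : PySem.Set (Int × Int)),
      (PySem.List.enumerate p.2.toList).foldl
        (fun s q => if q.2 != '#' then PySem.Set.add s (p.1, q.1) else s) s
      = List.foldl PySem.Set.add s
          (((PySem.List.enumerate p.2.toList).filter (fun q => q.2 != '#')).map
            (fun q => (p.1, q.1))) := by
    intro p s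
    rw [PySem.List.foldl_if_eq_foldl_filter, List.foldl_map]
  simp only [inner]
  rw [← List.foldl_flatMap]
  simpa using foldl_add_of_nodup (pvSel (fun c => c != '#') grid) []
    (by simpa using pvSel_nodup (fun c => c != '#') grid)

-- ===== VERDICT (by name: the statement is the Claim_ definition above) =====
theorem get_all_locations_spec : Claim_equal_get_all_locations := by
  intro grid _
  unfold Spec_get_all_locations
  rw [a_eq_sel, b_eq_sel]
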